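-- pv_equiv track=rewrite | github.com/Desislav-a/advent-of-code-2025 | day_5/solution_part_1.py | get_fresh_products
-- ===== SOURCE A (Python) =====
-- def get_fresh_products(fresh_ranges, products):
--
--     fresh_products = []
--
--     for product in products:
--         for current_range in fresh_ranges:
--
--             range_left_side = current_range[0]
--             range_right_side = current_range[1]
--
--             if product >= range_left_side and product <= range_right_side:
--                 fresh_products.append(product)
--
--
--     return fresh_products
-- ===== SOURCE B (Python) =====
-- def get_fresh_products(fresh_ranges, products):
--     # Keep only non-empty ranges (left <= right); empty ranges contain nothing.
--     lefts = sorted(l for l, r in fresh_ranges if l <= r)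
--     rights = sorted(r for l, r in fresh_ranges if l <= r)
--
--     def prefix_len(xs, x, strict):
--         # number of leading elements of sorted xs that are < x (strict) or <= x
--         lo, hi = 0, len(xs)
--         while lo < hi:
--             mid = (lo + hi) // 2
--             if (xs[mid] < x) if strict else (xs[mid] <= x):
--                 lo = mid + 1
--             else:
--                 hi = mid
--         return lo
--
--     out = []
--     for p in products:
--         # ranges containing p = (lefts <= p) - (rights < p)
--         out.extend([p] * (prefix_len(lefts, p, False) - prefix_len(rights, p, True)))
--     return out
-- ===== Notes on version B (the rewrite author's own statement) =====
-- stated objective: faster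
-- what changed: Instead of scanning every range for every product (O(P*R)), B sorts the non-empty ranges' left and right endpoints once and, per product, counts covering ranges as (#lefts <= p) - (#rights < p) via two binary searches, appending the product that many times.
import Mathlib
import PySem

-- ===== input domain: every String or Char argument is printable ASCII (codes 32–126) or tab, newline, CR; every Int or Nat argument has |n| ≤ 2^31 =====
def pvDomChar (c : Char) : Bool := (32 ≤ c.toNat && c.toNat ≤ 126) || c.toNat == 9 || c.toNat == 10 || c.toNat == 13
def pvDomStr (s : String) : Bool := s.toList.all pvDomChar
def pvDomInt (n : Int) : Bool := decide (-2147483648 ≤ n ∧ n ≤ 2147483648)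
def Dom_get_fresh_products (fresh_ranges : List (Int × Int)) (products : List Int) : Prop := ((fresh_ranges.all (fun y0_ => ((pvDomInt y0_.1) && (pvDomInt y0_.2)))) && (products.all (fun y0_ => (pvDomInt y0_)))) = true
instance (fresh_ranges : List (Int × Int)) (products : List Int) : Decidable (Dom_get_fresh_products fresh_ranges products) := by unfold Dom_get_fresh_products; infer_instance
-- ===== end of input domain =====

-- B replaces A's nested per-product scan of all ranges by sorting the non-empty ranges'
-- endpoints once and counting, per product, the covering ranges with two binary searches
-- (objective: faster).

-- ===== PORT A =====
-- for product in products: for current_range in fresh_ranges: if l <= product <= r: append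
def get_fresh_products (fresh_ranges : List (Int × Int)) (products : List Int) : List Int :=
  products.foldl (fun fresh_products product =>
    fresh_ranges.foldl (fun fp current_range =>
      if product ≥ current_range.1 ∧ product ≤ current_range.2 then fp ++ [product] else fp)
      fresh_products) []

-- ===== PORT B =====
-- hand-written binary search of Source B: number of leading elements of sorted xs that are
-- < x (strict = true) or ≤ x (strict = false); the while loop becomes recursion on hi - lo
def pvPrefixLen (xs : List Int) (x : Int) (strict : Bool) (lo hi : Nat) : Nat :=
  if lo < hi then
    if (if strict then xs.getD ((lo + hi) / 2) 0 < x else xs.getD ((lo + hi) / 2) 0 ≤ x) then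
      pvPrefixLen xs x strict ((lo + hi) / 2 + 1) hi
    else
      pvPrefixLen xs x strict lo ((lo + hi) / 2)
  else lo
termination_by hi - lo
decreasing_by all_goals omega

def get_fresh_products_alt (fresh_ranges : List (Int × Int)) (products : List Int) : List Int :=
  let valid := fresh_ranges.filter (fun q => decide (q.1 ≤ q.2))
  let lefts := PySem.List.sorted (valid.map (fun q => q.1)) (fun x => x) false
  let rights := PySem.List.sorted (valid.map (fun q => q.2)) (fun x => x) false
  products.foldl (fun out p =>
    out ++ List.replicate
      (pvPrefixLen lefts p false 0 lefts.length - pvPrefixLen rights p true 0 rights.length) p) []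

-- ===== PRECONDITION & SPEC =====
def Spec_get_fresh_products (fresh_ranges : List (Int × Int)) (products : List Int) (out : List Int) : Prop := out = get_fresh_products_alt fresh_ranges products
instance (fresh_ranges : List (Int × Int)) (products : List Int) (out : List Int) : Decidable (Spec_get_fresh_products fresh_ranges products out) := by unfold Spec_get_fresh_products; infer_instance

-- ===== CLAIM (what is proved, stated in full; the proofs are below) =====
def Claim_equal_get_fresh_products : Prop := ∀ (fresh_ranges : List (Int × Int)) (products : List Int), Dom_get_fresh_products fresh_ranges products → Spec_get_fresh_products fresh_ranges products (get_fresh_products fresh_ranges products)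

-- ===== LEMMAS AND PROOFS =====

-- the search predicate is downward closed in the list value
theorem pred_mono (s : Bool) (x v w : Int) (hvw : v ≤ w)
    (h : if s then w < x else w ≤ x) : if s then v < x else v ≤ x := by
  cases s <;> simp at h ⊢ <;> omega

theorem pred_mono_not (s : Bool) (x v w : Int) (hwv : w ≤ v)
    (h : ¬ (if s then w < x else w ≤ x)) : ¬ (if s then v < x else v ≤ x) := by
  cases s <;> simp at h ⊢ <;> omega

-- in a sorted list, getD is monotone in the index
theorem getD_mono_sorted (xs : List Int) (hs : List.Pairwise (· ≤ ·) xs)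
    (i j : Nat) (hij : i ≤ j) (hj : j < xs.length) : xs.getD i 0 ≤ xs.getD j 0 := by
  rcases Nat.lt_or_ge i j with h | h
  · rw [List.getD_eq_getElem xs 0 (by omega), List.getD_eq_getElem xs 0 hj]
    exact (List.pairwise_iff_getElem.mp hs) i j (by omega) hj h
  · have : i = j := by omega
    simp [this]

-- the binary search returns the boundary index: everything below it satisfies the
-- predicate, everything at or above it does not
theorem pvPrefixLen_boundary (xs : List Int) (x : Int) (s : Bool)
    (hs : List.Pairwise (· ≤ ·) xs) (lo hi : Nat)
    (hhi : hi ≤ xs.length) (hlohi : lo ≤ hi)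
    (hbelow : ∀ i, i < lo → (if s then xs.getD i 0 < x else xs.getD i 0 ≤ x))
    (habove : ∀ i, hi ≤ i → i < xs.length → ¬ (if s then xs.getD i 0 < x else xs.getD i 0 ≤ x)) :
    pvPrefixLen xs x s lo hi ≤ xs.length ∧
    (∀ i, i < pvPrefixLen xs x s lo hi → (if s then xs.getD i 0 < x else xs.getD i 0 ≤ x)) ∧
    (∀ i, pvPrefixLen xs x s lo hi ≤ i → i < xs.length →
      ¬ (if s then xs.getD i 0 < x else xs.getD i 0 ≤ x)) := by
  fun_induction pvPrefixLen xs x s lo hi with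
  | case1 lo hi hlt hmid ih =>
    apply ih (by omega) (by omega) ?_ habove
    intro i hi2
    by_cases hc : i < lo
    · exact hbelow i hc
    · exact pred_mono s x _ _ (getD_mono_sorted xs hs i ((lo + hi) / 2) (by omega) (by omega)) hmid
  | case2 lo hi hlt hmid ih =>
    apply ih (by omega) (by omega) hbelow
    intro i hge hlen
    by_cases hc : hi ≤ i
    · exact habove i hc hlen
    · exact pred_mono_not s x _ _ (getD_mono_sorted xs hs ((lo + hi) / 2) i (by omega) hlen) hmid
  | case3 lo hi hlt =>
    exact ⟨by omega, fun i h => hbelow i h, fun i h1 h2 => habove i (by omega) h2⟩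

-- countP of a predicate that holds exactly on the first k positions is k
theorem countP_eq_of_boundary {α : Type} (p : α → Bool) :
    ∀ (xs : List α) (k : Nat), k ≤ xs.length →
    (∀ i (h : i < xs.length), p xs[i] ↔ i < k) → xs.countP p = k := by
  intro xs
  induction xs with
  | nil => intro k hk _; simp at hk; simpa [hk]
  | cons a t ih =>
    intro k hk hb
    cases k with
    | zero =>
      have ha : p a = false := by simpa using hb 0 (by simp)
      have ht : t.countP p = 0 := by
        apply ih 0 (by omega)
        intro i hi
        simpa using hb (i + 1) (by simpa using Nat.succ_lt_succ hi)
      simp [List.countP_cons, ha, ht]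
    | succ k' =>
      have ha : p a = true := by simpa using hb 0 (by simp)
      have ht : t.countP p = k' := by
        apply ih k' (by simpa using hk)
        intro i hi
        simpa [Nat.succ_lt_succ_iff] using hb (i + 1) (by simpa using Nat.succ_lt_succ hi)
      simp [List.countP_cons, ha, ht]

-- for a sorted list the binary search computes countP
theorem pvPrefixLen_eq_countP (xs : List Int) (x : Int) (s : Bool)
    (hs : List.Pairwise (· ≤ ·) xs) :
    pvPrefixLen xs x s 0 xs.length
      = xs.countP (fun v => if s then decide (v < x) else decide (v ≤ x)) := by
  obtain ⟨hle, hbelow, habove⟩ :=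
    pvPrefixLen_boundary xs x s hs 0 xs.length le_rfl (Nat.zero_le _)
      (by intro i h; omega) (by intro i h1 h2; omega)
  refine (countP_eq_of_boundary _ xs _ hle ?_).symm
  intro i hi
  have hg : xs.getD i 0 = xs[i] := List.getD_eq_getElem xs 0 hi
  constructor
  · intro hp
    by_contra hge
    have := habove i (by omega) hi
    rw [hg] at this
    cases s <;> simp_all
  · intro hlt
    have := hbelow i hlt
    rw [hg] at this
    cases s <;> simp_all

-- on ranges with l ≤ r: #(l ≤ p) = #(l ≤ p ∧ p ≤ r) + #(r < p)
theorem count_split (p : Int) :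
    ∀ (rs : List (Int × Int)), (∀ q ∈ rs, q.1 ≤ q.2) →
    rs.countP (fun q => decide (q.1 ≤ p))
      = rs.countP (fun q => decide (p ≥ q.1 ∧ p ≤ q.2)) + rs.countP (fun q => decide (q.2 < p)) := by
  intro rs
  induction rs with
  | nil => intro _; simp
  | cons a t ih =>
    intro h
    have ha : a.1 ≤ a.2 := h a (by simp)
    have ht := ih (fun q hq => h q (by simp [hq]))
    simp only [List.countP_cons, ht]
    by_cases h1 : a.1 ≤ p
    · by_cases h2 : p ≤ a.2
      · have h3 : ¬ a.2 < p := by omega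
        simp [h1, h2, h3]
        omega
      · have h3 : a.2 < p := by omega
        simp [h1, h2, h3]
        omega
    · have h2 : ¬ a.2 < p := by omega
      have h3 : ¬ (p ≥ a.1 ∧ p ≤ a.2) := by omega
      simp [h1, h2, h3]

-- A's inner loop over the ranges appends p once per containing range
theorem inner_loop_eq (p : Int) :
    ∀ (rs : List (Int × Int)) (acc : List Int),
    rs.foldl (fun fp cr => if p ≥ cr.1 ∧ p ≤ cr.2 then fp ++ [p] else fp) acc
      = acc ++ List.replicate (rs.countP (fun q => decide (p ≥ q.1 ∧ p ≤ q.2))) p := by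
  intro rs
  induction rs with
  | nil => intro acc; simp
  | cons a t ih =>
    intro acc
    by_cases h : p ≥ a.1 ∧ p ≤ a.2
    · simp [List.foldl_cons, h, ih, List.countP_cons, List.replicate_succ,
        List.append_assoc]
    · simp [List.foldl_cons, h, ih, List.countP_cons]

-- a foldl that appends a block per element is a flatMap
theorem foldl_append_blocks {α : Type} (f : α → List Int) :
    ∀ (xs : List α) (acc : List Int),
    xs.foldl (fun out x => out ++ f x) acc = acc ++ xs.flatMap f := by
  intro xs
  induction xs with
  | nil => intro acc; simp
  | cons a t ih => intro acc; simp [List.foldl_cons, ih, List.append_assoc]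

-- per product, B's two search results subtract to A's per-product count
theorem counts_agree (fresh_ranges : List (Int × Int)) (p : Int) :
    (pvPrefixLen (PySem.List.sorted ((fresh_ranges.filter (fun q => decide (q.1 ≤ q.2))).map (fun q => q.1)) (fun x => x) false) p false 0
        (PySem.List.sorted ((fresh_ranges.filter (fun q => decide (q.1 ≤ q.2))).map (fun q => q.1)) (fun x => x) false).length
      - pvPrefixLen (PySem.List.sorted ((fresh_ranges.filter (fun q => decide (q.1 ≤ q.2))).map (fun q => q.2)) (fun x => x) false) p true 0
        (PySem.List.sorted ((fresh_ranges.filter (fun q => decide (q.1 ≤ q.2))).map (fun q => q.2)) (fun x => x) false).length)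
    = fresh_ranges.countP (fun q => decide (p ≥ q.1 ∧ p ≤ q.2)) := by
  set vr := fresh_ranges.filter (fun q => decide (q.1 ≤ q.2)) with hvr
  have hvalid : ∀ q ∈ vr, q.1 ≤ q.2 := by
    intro q hq
    simpa using List.of_mem_filter hq
  have hL : (PySem.List.sorted (vr.map (fun q => q.1)) (fun x => x) false).Pairwise (· ≤ ·) := by
    simpa using PySem.List.sorted_pairwise (vr.map (fun q => q.1)) (fun x => x)
  have hR : (PySem.List.sorted (vr.map (fun q => q.2)) (fun x => x) false).Pairwise (· ≤ ·) := by
    simpa using PySem.List.sorted_pairwise (vr.map (fun q => q.2)) (fun x => x)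
  rw [pvPrefixLen_eq_countP _ _ _ hL, pvPrefixLen_eq_countP _ _ _ hR,
      (PySem.List.sorted_perm (vr.map (fun q => q.1)) (fun x => x) false).countP_eq,
      (PySem.List.sorted_perm (vr.map (fun q => q.2)) (fun x => x) false).countP_eq,
      List.countP_map, List.countP_map]
  have hfull : fresh_ranges.countP (fun q => decide (p ≥ q.1 ∧ p ≤ q.2))
      = vr.countP (fun q => decide (p ≥ q.1 ∧ p ≤ q.2)) := by
    rw [hvr, List.countP_filter]
    apply List.countP_congr
    intro q _
    by_cases h : p ≥ q.1 ∧ p ≤ q.2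
    · have h2 : q.1 ≤ q.2 := by omega
      simp [h, h2]
    · simp [h]
  have hsplit := count_split p vr hvalid
  have e1 : vr.countP ((fun v => if false = true then decide (v < p) else decide (v ≤ p)) ∘ (fun q : Int × Int => q.1))
      = vr.countP (fun q : Int × Int => decide (q.1 ≤ p)) :=
    List.countP_congr (by intro q _; simp)
  have e2 : vr.countP ((fun v => if true = true then decide (v < p) else decide (v ≤ p)) ∘ (fun q : Int × Int => q.2))
      = vr.countP (fun q : Int × Int => decide (q.2 < p)) :=
    List.countP_congr (by intro q _; simp)
  rw [e1, e2, hfull, hsplit]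
  omega

-- ===== VERDICT (by name: the statement is the Claim_ definition above) =====
theorem get_fresh_products_spec : Claim_equal_get_fresh_products := by
  intro fresh_ranges products _
  unfold Spec_get_fresh_products
  have hA : get_fresh_products fresh_ranges products
      = products.flatMap (fun p =>
          List.replicate (fresh_ranges.countP (fun q => decide (p ≥ q.1 ∧ p ≤ q.2))) p) := by
    unfold get_fresh_products
    have h1 := PySem.List.foldl_congr_mem products
      (fun fresh_products product =>
        fresh_ranges.foldl (fun fp cr =>
          if product ≥ cr.1 ∧ product ≤ cr.2 then fp ++ [product] else fp) fresh_products)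
      (fun out p =>
        out ++ List.replicate (fresh_ranges.countP (fun q => decide (p ≥ q.1 ∧ p ≤ q.2))) p)
      [] (fun acc p _ => inner_loop_eq p fresh_ranges acc)
    rw [h1, foldl_append_blocks, List.nil_append]
  have hB : get_fresh_products_alt fresh_ranges products
      = products.flatMap (fun p =>
          List.replicate (fresh_ranges.countP (fun q => decide (p ≥ q.1 ∧ p ≤ q.2))) p) := by
    simp only [get_fresh_products_alt]
    rw [foldl_append_blocks, List.nil_append]
    apply List.flatMap_congr
    intro p _
    rw [counts_agree fresh_ranges p]
  rw [hA, hB]
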